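-- pv_equiv track=rewrite | github.com/SmartgenieUK/AgenticCloudDiscovery | agent-orchestrator/discoveries/agent_workflow.py | match_providers_to_categories
-- ===== SOURCE A (Python) =====
-- from typing import Callable, Dict, List, Optional
--
-- SERVICE_CATEGORIES = {
--     "compute": {
--         "tool_id": "compute_discovery",
--         "label": "Compute",
--         "provider_namespaces": ["Microsoft.Compute"],
--     },
--     "storage": {
--         "tool_id": "storage_discovery",
--         "label": "Storage",
--         "provider_namespaces": ["Microsoft.Storage"],
--     },
--     "databases": {
--         "tool_id": "database_discovery",
--         "label": "Databases",
--         "provider_namespaces": ["Microsoft.Sql", "Microsoft.DBforMySQL", "Microsoft.DBforPostgreSQL"],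
--     },
--     "networking": {
--         "tool_id": "networking_discovery",
--         "label": "Networking",
--         "provider_namespaces": ["Microsoft.Network"],
--     },
--     "app_services": {
--         "tool_id": "appservice_discovery",
--         "label": "App Services",
--         "provider_namespaces": ["Microsoft.Web"],
--     },
-- }
--
-- def match_providers_to_categories(inventory_resources: List[Dict]) -> Dict[str, bool]:
--     """Determine which service categories have matching resources in the inventory."""
--     found_namespaces = set()
--     for resource in inventory_resources:
--         resource_type = resource.get("type", "")
--         namespace = resource_type.split("/")[0] if "/" in resource_type else resource_type
--         found_namespaces.add(namespace)
--
--     category_matches = {}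
--     for cat_key, cat_def in SERVICE_CATEGORIES.items():
--         has_match = any(ns in found_namespaces for ns in cat_def["provider_namespaces"])
--         category_matches[cat_key] = has_match
--     return category_matches
-- ===== SOURCE B (Python) =====
-- from typing import Dict, List
--
-- SERVICE_CATEGORIES = {
--     "compute": {
--         "tool_id": "compute_discovery",
--         "label": "Compute",
--         "provider_namespaces": ["Microsoft.Compute"],
--     },
--     "storage": {
--         "tool_id": "storage_discovery",
--         "label": "Storage",
--         "provider_namespaces": ["Microsoft.Storage"],
--     },
--     "databases": {
--         "tool_id": "database_discovery",
--         "label": "Databases",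
--         "provider_namespaces": ["Microsoft.Sql", "Microsoft.DBforMySQL", "Microsoft.DBforPostgreSQL"],
--     },
--     "networking": {
--         "tool_id": "networking_discovery",
--         "label": "Networking",
--         "provider_namespaces": ["Microsoft.Network"],
--     },
--     "app_services": {
--         "tool_id": "appservice_discovery",
--         "label": "App Services",
--         "provider_namespaces": ["Microsoft.Web"],
--     },
-- }
--
--
-- def match_providers_to_categories(inventory_resources: List[Dict]) -> Dict[str, bool]:
--     """Determine which service categories have matching resources in the inventory."""
--     namespace_to_category = {}
--     for cat_key, cat_def in SERVICE_CATEGORIES.items():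
--         for ns in cat_def["provider_namespaces"]:
--             namespace_to_category[ns] = cat_key
--
--     category_matches = {cat_key: False for cat_key in SERVICE_CATEGORIES}
--     for resource in inventory_resources:
--         resource_type = resource.get("type", "")
--         namespace = resource_type.split("/")[0] if "/" in resource_type else resource_type
--         cat_key = namespace_to_category.get(namespace)
--         if cat_key is not None:
--             category_matches[cat_key] = True
--     return category_matches
-- ===== Notes on version B (the rewrite author's own statement) =====
-- stated objective: alternative
-- what changed: Replaced A's found-namespace set plus per-category any()-scan by a reverse index (namespace -> category) built once from SERVICE_CATEGORIES, so one pass over the resources sets the matching category flags directly.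
import Mathlib
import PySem

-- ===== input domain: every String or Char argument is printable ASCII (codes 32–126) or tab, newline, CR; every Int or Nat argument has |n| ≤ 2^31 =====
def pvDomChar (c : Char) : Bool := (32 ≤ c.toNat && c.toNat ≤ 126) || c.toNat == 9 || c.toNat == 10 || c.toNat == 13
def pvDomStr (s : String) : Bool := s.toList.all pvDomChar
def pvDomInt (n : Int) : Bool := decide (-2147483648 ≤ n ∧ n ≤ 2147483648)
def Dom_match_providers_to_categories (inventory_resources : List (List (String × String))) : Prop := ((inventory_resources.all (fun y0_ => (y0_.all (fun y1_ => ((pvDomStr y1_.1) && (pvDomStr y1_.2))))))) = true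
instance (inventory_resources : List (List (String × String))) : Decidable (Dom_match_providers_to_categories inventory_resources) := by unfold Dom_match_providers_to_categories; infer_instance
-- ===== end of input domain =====

-- B replaces A's per-category any()-scan over a found-namespace set by a reverse
-- index namespace -> category built once, setting flags in one pass over resources.

-- ===== PORT A =====

-- SERVICE_CATEGORIES, restricted to the fields the function reads (key, provider_namespaces), in dict order
def pvCats : List (String × List String) :=
  [("compute", ["Microsoft.Compute"]),
   ("storage", ["Microsoft.Storage"]),
   ("databases", ["Microsoft.Sql", "Microsoft.DBforMySQL", "Microsoft.DBforPostgreSQL"]),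
   ("networking", ["Microsoft.Network"]),
   ("app_services", ["Microsoft.Web"])]

-- namespace = resource_type.split("/")[0] if "/" in resource_type else resource_type
-- (split("/") with "/" present is never empty, so the [0] cannot raise; pyGetD is exact here)
def pvNs (resource : List (String × String)) : String :=
  let resource_type := (PySem.Dict.mk resource).getD "type" ""
  if PySem.Str.isIn "/" resource_type then
    PySem.List.pyGetD ((PySem.Str.split? resource_type "/").getD []) 0 ""
  else resource_type

def match_providers_to_categories (inventory_resources : List (List (String × String))) : List (String × Bool) :=
  let found_namespaces : PySem.Set String :=
    inventory_resources.foldl (fun s resource => PySem.Set.add s (pvNs resource)) PySem.Set.empty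
  let category_matches : PySem.Dict String Bool :=
    pvCats.foldl
      (fun d c => d.insert c.1 (c.2.any (fun ns => PySem.Set.contains found_namespaces ns)))
      PySem.Dict.empty
  category_matches.items

-- ===== PORT B =====

def match_providers_to_categories_alt (inventory_resources : List (List (String × String))) : List (String × Bool) :=
  let namespace_to_category : PySem.Dict String String :=
    pvCats.foldl (fun d c => c.2.foldl (fun d ns => d.insert ns c.1) d) PySem.Dict.empty
  let init : PySem.Dict String Bool :=
    pvCats.foldl (fun d c => d.insert c.1 false) PySem.Dict.empty
  let category_matches : PySem.Dict String Bool :=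
    inventory_resources.foldl
      (fun d resource =>
        match namespace_to_category.get? (pvNs resource) with
        | some cat_key => d.insert cat_key true
        | none => d)
      init
  category_matches.items

-- ===== PRECONDITION & SPEC =====
def Spec_match_providers_to_categories (inventory_resources : List (List (String × String))) (out : List (String × Bool)) : Prop := out = match_providers_to_categories_alt inventory_resources
instance (inventory_resources : List (List (String × String))) (out : List (String × Bool)) : Decidable (Spec_match_providers_to_categories inventory_resources out) := by unfold Spec_match_providers_to_categories; infer_instance

-- ===== CLAIM (what is proved, stated in full; the proofs are below) =====
def Claim_equal_match_providers_to_categories : Prop := ∀ (inventory_resources : List (List (String × String))), Dom_match_providers_to_categories inventory_resources → Spec_match_providers_to_categories inventory_resources (match_providers_to_categories inventory_resources)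

-- ===== LEMMAS AND PROOFS =====

-- any distributes over a disjunction of predicates
theorem pv_any_or {α : Type} (l : List α) (f g : α → Bool) :
    l.any (fun x => f x || g x) = (l.any f || l.any g) := by
  induction l with
  | nil => rfl
  | cons a l ih =>
    simp only [List.any_cons, ih]
    cases f a <;> cases g a <;> simp

-- A's found-namespace set: membership test after the building fold
theorem pv_contains_fold (inv : List (List (String × String))) (s : PySem.Set String) (x : String) :
    PySem.Set.contains (inv.foldl (fun s r => PySem.Set.add s (pvNs r)) s) x
      = (PySem.Set.contains s x || inv.any (fun r => pvNs r == x)) := by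
  induction inv generalizing s with
  | nil => simp
  | cons r inv ih =>
    simp only [List.foldl_cons, List.any_cons, ih]
    have : PySem.Set.contains (PySem.Set.add s (pvNs r)) x
        = (PySem.Set.contains s x || pvNs r == x) := by
      by_cases h : pvNs r = x
      · subst h; simp [PySem.Set.mem_add]
      · have hb : (pvNs r == x) = false := by simp [h]
        have hne : x ≠ pvNs r := fun e => h e.symm
        simp [PySem.Set.mem_add, hb, hne]
    rw [this, Bool.or_assoc, Bool.or_comm (pvNs r == x)]

-- the membership test, Bool-level, after the set-building fold from the empty set
theorem pv_decide_mem (inv : List (List (String × String))) (x : String) :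
    decide (x ∈ inv.foldl (fun s r => PySem.Set.add s (pvNs r)) ([] : PySem.Set String))
      = inv.any (fun r => pvNs r == x) := by
  have h := pv_contains_fold inv PySem.Set.empty x
  have hc : ∀ (l : PySem.Set String), PySem.Set.contains l x = decide (x ∈ l) := by
    intro l
    by_cases hx : x ∈ l <;> simp [hx]
  simpa [hc, PySem.Set.empty] using h

-- the reverse index built by B's first loop, as a lookup function
theorem pv_index_get (x : String) :
    (pvCats.foldl (fun d c => c.2.foldl (fun d ns => PySem.Dict.insert d ns c.1) d) PySem.Dict.empty).get? x =
    if "Microsoft.Compute" = x then some "compute"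
    else if "Microsoft.Storage" = x then some "storage"
    else if "Microsoft.Sql" = x then some "databases"
    else if "Microsoft.DBforMySQL" = x then some "databases"
    else if "Microsoft.DBforPostgreSQL" = x then some "databases"
    else if "Microsoft.Network" = x then some "networking"
    else if "Microsoft.Web" = x then some "app_services"
    else none := by
  have hfold :
      (pvCats.foldl (fun d c => c.2.foldl (fun d ns => PySem.Dict.insert d ns c.1) d) PySem.Dict.empty)
        = PySem.Dict.mk [("Microsoft.Compute", "compute"), ("Microsoft.Storage", "storage"),
            ("Microsoft.Sql", "databases"), ("Microsoft.DBforMySQL", "databases"),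
            ("Microsoft.DBforPostgreSQL", "databases"), ("Microsoft.Network", "networking"),
            ("Microsoft.Web", "app_services")] := by decide
  rw [hfold]
  simp [PySem.Dict.get?_mk_cons]
  simp [PySem.Dict.get?]

-- B's flag-updating fold, with the five flags generalized
theorem pv_alt_fold (inv : List (List (String × String))) (b1 b2 b3 b4 b5 : Bool) :
    (inv.foldl
      (fun (d : PySem.Dict String Bool) r =>
        match (pvCats.foldl (fun d c => c.2.foldl (fun d ns => PySem.Dict.insert d ns c.1) d) PySem.Dict.empty).get? (pvNs r) with
        | some cat_key => d.insert cat_key true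
        | none => d)
      (PySem.Dict.mk [("compute", b1), ("storage", b2), ("databases", b3), ("networking", b4), ("app_services", b5)])).items
    = [("compute", b1 || inv.any (fun r => pvNs r == "Microsoft.Compute")),
       ("storage", b2 || inv.any (fun r => pvNs r == "Microsoft.Storage")),
       ("databases", b3 || inv.any (fun r => pvNs r == "Microsoft.Sql" || (pvNs r == "Microsoft.DBforMySQL" || pvNs r == "Microsoft.DBforPostgreSQL"))),
       ("networking", b4 || inv.any (fun r => pvNs r == "Microsoft.Network")),
       ("app_services", b5 || inv.any (fun r => pvNs r == "Microsoft.Web"))] := by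
  induction inv generalizing b1 b2 b3 b4 b5 with
  | nil => simp
  | cons r inv ih =>
    rw [List.foldl_cons]
    have hstep :
        (match (pvCats.foldl (fun d c => c.2.foldl (fun d ns => PySem.Dict.insert d ns c.1) d) PySem.Dict.empty).get? (pvNs r) with
          | some cat_key => PySem.Dict.insert (PySem.Dict.mk [("compute", b1), ("storage", b2), ("databases", b3), ("networking", b4), ("app_services", b5)]) cat_key true
          | none => PySem.Dict.mk [("compute", b1), ("storage", b2), ("databases", b3), ("networking", b4), ("app_services", b5)])
        = PySem.Dict.mk
            [("compute", b1 || (pvNs r == "Microsoft.Compute")),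
             ("storage", b2 || (pvNs r == "Microsoft.Storage")),
             ("databases", b3 || (pvNs r == "Microsoft.Sql" || (pvNs r == "Microsoft.DBforMySQL" || pvNs r == "Microsoft.DBforPostgreSQL"))),
             ("networking", b4 || (pvNs r == "Microsoft.Network")),
             ("app_services", b5 || (pvNs r == "Microsoft.Web"))] := by
      rw [pv_index_get]
      by_cases h1 : "Microsoft.Compute" = pvNs r
      · simp [← h1, PySem.Dict.insert, PySem.Dict.contains]
      by_cases h2 : "Microsoft.Storage" = pvNs r
      · simp [← h2, PySem.Dict.insert, PySem.Dict.contains]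
      by_cases h3 : "Microsoft.Sql" = pvNs r
      · simp [← h3, PySem.Dict.insert, PySem.Dict.contains]
      by_cases h4 : "Microsoft.DBforMySQL" = pvNs r
      · simp [← h4, PySem.Dict.insert, PySem.Dict.contains]
      by_cases h5 : "Microsoft.DBforPostgreSQL" = pvNs r
      · simp [← h5, PySem.Dict.insert, PySem.Dict.contains]
      by_cases h6 : "Microsoft.Network" = pvNs r
      · simp [← h6, PySem.Dict.insert, PySem.Dict.contains]
      by_cases h7 : "Microsoft.Web" = pvNs r
      · simp [← h7, PySem.Dict.insert, PySem.Dict.contains]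
      · have e1 : (pvNs r == "Microsoft.Compute") = false := beq_eq_false_iff_ne.mpr (Ne.symm h1)
        have e2 : (pvNs r == "Microsoft.Storage") = false := beq_eq_false_iff_ne.mpr (Ne.symm h2)
        have e3 : (pvNs r == "Microsoft.Sql") = false := beq_eq_false_iff_ne.mpr (Ne.symm h3)
        have e4 : (pvNs r == "Microsoft.DBforMySQL") = false := beq_eq_false_iff_ne.mpr (Ne.symm h4)
        have e5 : (pvNs r == "Microsoft.DBforPostgreSQL") = false := beq_eq_false_iff_ne.mpr (Ne.symm h5)
        have e6 : (pvNs r == "Microsoft.Network") = false := beq_eq_false_iff_ne.mpr (Ne.symm h6)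
        have e7 : (pvNs r == "Microsoft.Web") = false := beq_eq_false_iff_ne.mpr (Ne.symm h7)
        simp [h1, h2, h3, h4, h5, h6, h7, e1, e2, e3, e4, e5, e6, e7]
    simp only [hstep, ih, List.any_cons]
    simp [Bool.or_assoc]

-- ===== VERDICT (by name: the statement is the Claim_ definition above) =====
theorem match_providers_to_categories_spec : Claim_equal_match_providers_to_categories := by
  intro inv _
  unfold Spec_match_providers_to_categories match_providers_to_categories match_providers_to_categories_alt
  dsimp only
  have hinit : (pvCats.foldl (fun (d : PySem.Dict String Bool) c => d.insert c.1 false) PySem.Dict.empty)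
      = PySem.Dict.mk [("compute", false), ("storage", false), ("databases", false),
          ("networking", false), ("app_services", false)] := by decide
  rw [hinit, pv_alt_fold]
  simp [pvCats, PySem.Dict.insert, PySem.Dict.contains, PySem.Dict.empty,
        pv_decide_mem, pv_any_or]
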